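-- pv_equiv track=rewrite | github.com/seligman/aoc | 2016/Helpers/day_13.py | calc_point
-- ===== SOURCE A (Python) =====
-- def calc_point(x, y, num):
--     num = x * x + 3 * x + 2 * x * y + y + y * y + num
--     ret = 0
--     while num > 0:
--         if num & 1 == 1:
--             ret += 1
--         num >>= 1
--     if ret % 2 == 0:
--         return "."
--     else:
--         return "#"
-- ===== SOURCE B (Python) =====
-- def calc_point(x, y, num):
--     v = x * x + 3 * x + 2 * x * y + y + y * y + num
--     if v <= 0:
--         return "."
--     # parity of popcount via xor-folding; valid since |x|,|y|,|num| <= 2**31 keeps v < 2**128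
--     v ^= v >> 64
--     v ^= v >> 32
--     v ^= v >> 16
--     v ^= v >> 8
--     v ^= v >> 4
--     v ^= v >> 2
--     v ^= v >> 1
--     return "#" if v & 1 == 1 else "."
-- ===== Notes on version B (the rewrite author's own statement) =====
-- stated objective: alternative
-- what changed: Replaces A's per-bit shift-and-test counting loop by a loop-free xor-fold parity reduction (v ^= v>>64 ... v ^= v>>1; low bit is the popcount parity), valid on the domain's 128-bit-bounded values.
import Mathlib
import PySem

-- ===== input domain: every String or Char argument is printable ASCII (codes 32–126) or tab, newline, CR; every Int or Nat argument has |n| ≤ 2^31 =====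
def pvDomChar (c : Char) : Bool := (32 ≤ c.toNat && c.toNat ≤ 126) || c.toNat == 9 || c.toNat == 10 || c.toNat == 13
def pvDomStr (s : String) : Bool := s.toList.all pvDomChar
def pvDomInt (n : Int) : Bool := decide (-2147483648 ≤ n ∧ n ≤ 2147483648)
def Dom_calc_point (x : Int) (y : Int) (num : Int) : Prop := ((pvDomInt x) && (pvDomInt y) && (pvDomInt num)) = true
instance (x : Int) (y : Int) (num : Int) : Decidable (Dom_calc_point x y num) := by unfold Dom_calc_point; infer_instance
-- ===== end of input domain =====

-- B replaces A's per-bit shift-and-test counting loop by a loop-free xor-fold parity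
-- reduction (v ^= v>>64 … v ^= v>>1; the low bit is the popcount parity), correct for
-- the domain's 128-bit-bounded formula values; same return value as A.

-- ===== PORT A =====
-- while num > 0: if num & 1 == 1: ret += 1; num >>= 1
def pvBitLoop (num ret : Int) : Int :=
  if 0 < num then
    pvBitLoop (num >>> (1 : Nat)) (if PySem.Int.band num 1 = 1 then ret + 1 else ret)
  else ret
termination_by num.toNat
decreasing_by
  simp only [Int.shiftRight_eq_div_pow]
  omega

def calc_point (x : Int) (y : Int) (num : Int) : String :=
  let num := x * x + 3 * x + 2 * x * y + y + y * y + num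
  let ret := pvBitLoop num 0
  if PySem.Int.mod ret 2 = 0 then "." else "#"

-- ===== PORT B =====
-- v ^= v >> 64; ...; v ^= v >> 1   (the seven straight-line fold steps of Source B)
def pvXorFold (v : Int) : Int :=
  let v := PySem.Int.bxor v (v >>> (64 : Nat))
  let v := PySem.Int.bxor v (v >>> (32 : Nat))
  let v := PySem.Int.bxor v (v >>> (16 : Nat))
  let v := PySem.Int.bxor v (v >>> (8 : Nat))
  let v := PySem.Int.bxor v (v >>> (4 : Nat))
  let v := PySem.Int.bxor v (v >>> (2 : Nat))
  let v := PySem.Int.bxor v (v >>> (1 : Nat))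
  v

def calc_point_alt (x : Int) (y : Int) (num : Int) : String :=
  let v := x * x + 3 * x + 2 * x * y + y + y * y + num
  if v ≤ 0 then "."
  else if PySem.Int.band (pvXorFold v) 1 = 1 then "#" else "."

-- ===== PRECONDITION & SPEC =====
def Spec_calc_point (x : Int) (y : Int) (num : Int) (out : String) : Prop := out = calc_point_alt x y num
instance (x : Int) (y : Int) (num : Int) (out : String) : Decidable (Spec_calc_point x y num out) := by unfold Spec_calc_point; infer_instance

-- ===== CLAIM (what is proved, stated in full; the proofs are below) =====
def Claim_equal_calc_point : Prop := ∀ (x : Int) (y : Int) (num : Int), Dom_calc_point x y num → Spec_calc_point x y num (calc_point x y num)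

-- ===== LEMMAS AND PROOFS =====

-- popcount of a natural number, via PySem's Python-exact bit_count
def pvBc (m : Nat) : Nat := PySem.Int.bitCount (m : Int)

theorem pvBc_rec' (m : Nat) : pvBc m = m % 2 + pvBc (m / 2) := by
  rcases Nat.eq_zero_or_pos m with h | h
  · subst h; decide
  · exact PySem.Int.bitCount_natCast h

-- the bit-counting loop of A computes the popcount
theorem pvBitLoop_eq : ∀ (m : Nat) (ret : Int), pvBitLoop (m : Int) ret = ret + (pvBc m : Int) := by
  intro m
  induction m using Nat.strong_induction_on with
  | _ m ih =>
    intro ret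
    rcases Nat.eq_zero_or_pos m with h | h
    · subst h
      rw [pvBitLoop]
      have h0 : pvBc 0 = 0 := by decide
      rw [h0]
      norm_num
    · rw [pvBitLoop]
      have hpos : (0 : Int) < (m : Int) := by exact_mod_cast h
      rw [if_pos hpos]
      have hsh : ((m : Int) >>> (1 : Nat)) = ((m / 2 : Nat) : Int) := by
        rw [Int.shiftRight_eq_div_pow]
        push_cast
        rfl
      have hband : PySem.Int.band (m : Int) 1 = ((m % 2 : Nat) : Int) := by
        have := PySem.Int.band_natCast (m := m) (n := 1)
        rw [show ((1:Nat):Int) = (1:Int) by rfl] at this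
        rw [this, Nat.and_one_is_mod]
      rw [hsh, hband, ih (m / 2) (by omega), pvBc_rec' m]
      split_ifs with hc <;> push_cast at hc ⊢ <;> omega

-- (a ^^^ b) / 2 = a/2 ^^^ b/2
theorem pvXorDiv (a b : Nat) : (a ^^^ b) / 2 = a / 2 ^^^ b / 2 := by
  apply Nat.eq_of_testBit_eq
  intro i
  simp only [← Nat.testBit_succ, Nat.testBit_xor]

-- (a ^^^ b) % 2^k = (a % 2^k) ^^^ (b % 2^k)
theorem pvXorMod (a b k : Nat) : (a ^^^ b) % 2 ^ k = a % 2 ^ k ^^^ b % 2 ^ k := by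
  apply Nat.eq_of_testBit_eq
  intro i
  rw [Nat.testBit_mod_two_pow, Nat.testBit_xor, Nat.testBit_xor,
      Nat.testBit_mod_two_pow, Nat.testBit_mod_two_pow]
  by_cases h : i < k <;> simp [h]

-- popcount parity of an xor is the sum of the parities
theorem pvBc_xor_parity (a b : Nat) : pvBc (a ^^^ b) % 2 = (pvBc a + pvBc b) % 2 := by
  have H : ∀ n, ∀ a b : Nat, a + b ≤ n → pvBc (a ^^^ b) % 2 = (pvBc a + pvBc b) % 2 := by
    intro n
    induction n with
    | zero =>
        intro a b h
        have ha : a = 0 := by omega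
        have hb : b = 0 := by omega
        subst ha; subst hb; decide
    | succ n ih =>
        intro a b h
        rcases Nat.eq_zero_or_pos (a + b) with h0 | h0
        · have ha : a = 0 := by omega
          have hb : b = 0 := by omega
          subst ha; subst hb; decide
        · have hmod : (a ^^^ b) % 2 = a % 2 ^^^ b % 2 := by
            have := pvXorMod a b 1
            simpa using this
          have hrec := pvBc_rec' (a ^^^ b)
          have hra := pvBc_rec' a
          have hrb := pvBc_rec' b
          have hih := ih (a / 2) (b / 2) (by omega)
          rw [pvXorDiv a b] at hrec
          have hx : a % 2 ^^^ b % 2 = (a % 2 + b % 2) % 2 := by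
            have ha2 : a % 2 = 0 ∨ a % 2 = 1 := by omega
            have hb2 : b % 2 = 0 ∨ b % 2 = 1 := by omega
            rcases ha2 with h2 | h2 <;> rcases hb2 with h3 | h3 <;> rw [h2, h3] <;> decide
          rw [hmod, hx] at hrec
          omega
  exact H (a + b) a b le_rfl

-- popcount of a bit-disjoint sum: a < 2^k → pvBc (a + 2^k * b) = pvBc a + pvBc b
theorem pvBc_add_shift : ∀ (k a b : Nat), a < 2 ^ k → pvBc (a + 2 ^ k * b) = pvBc a + pvBc b := by
  intro k
  induction k with
  | zero =>
      intro a b h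
      have ha : a = 0 := by omega
      subst ha
      simp
      decide
  | succ k ih =>
      intro a b h
      have hrec := pvBc_rec' (a + 2 ^ (k + 1) * b)
      have hmod : (a + 2 ^ (k + 1) * b) % 2 = a % 2 := by
        have h2 : 2 ^ (k + 1) * b = 2 * (2 ^ k * b) := by ring
        omega
      have hdiv : (a + 2 ^ (k + 1) * b) / 2 = a / 2 + 2 ^ k * b := by
        have h2 : 2 ^ (k + 1) * b = 2 * (2 ^ k * b) := by ring
        omega
      rw [hmod, hdiv, ih (a / 2) b (by omega)] at hrec
      rw [hrec, pvBc_rec' a]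
      omega

-- the xor-fold step, at the Nat level
def pvStep (k n : Nat) : Nat := n ^^^ (n >>> k)

-- one xor-fold step halves the window while preserving the popcount parity
theorem pvFoldStep (k n : Nat) :
    pvBc (pvStep k n % 2 ^ k) % 2 = pvBc (n % (2 ^ k * 2 ^ k)) % 2 := by
  unfold pvStep
  rw [Nat.shiftRight_eq_div_pow, pvXorMod, pvBc_xor_parity, Nat.mod_mul,
      pvBc_add_shift k (n % 2 ^ k) (n / 2 ^ k % 2 ^ k) (Nat.mod_lt _ (by positivity))]

-- casts for the port's Int-level operations on nonnegative values
theorem pvShiftCast (m k : Nat) : ((m : Int) >>> k) = ((m >>> k : Nat) : Int) := by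
  rw [Int.shiftRight_eq_div_pow, Nat.shiftRight_eq_div_pow]
  push_cast
  rfl

theorem pvXorFoldCast (m k : Nat) :
    PySem.Int.bxor (m : Int) ((m : Int) >>> k) = ((pvStep k m : Nat) : Int) := by
  rw [pvShiftCast, PySem.Int.bxor_natCast]
  rfl

-- the whole seven-step xor fold: for m < 2^128 the final low bit is the popcount parity
theorem pvFoldAll (m : Nat) (hm : m < 2 ^ 128) :
    pvStep 1 (pvStep 2 (pvStep 4 (pvStep 8 (pvStep 16 (pvStep 32 (pvStep 64 m)))))) % 2
      = pvBc m % 2 := by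
  have e64 := pvFoldStep 64 m
  have e32 := pvFoldStep 32 (pvStep 64 m)
  have e16 := pvFoldStep 16 (pvStep 32 (pvStep 64 m))
  have e8 := pvFoldStep 8 (pvStep 16 (pvStep 32 (pvStep 64 m)))
  have e4 := pvFoldStep 4 (pvStep 8 (pvStep 16 (pvStep 32 (pvStep 64 m))))
  have e2 := pvFoldStep 2 (pvStep 4 (pvStep 8 (pvStep 16 (pvStep 32 (pvStep 64 m)))))
  have e1 := pvFoldStep 1 (pvStep 2 (pvStep 4 (pvStep 8 (pvStep 16 (pvStep 32 (pvStep 64 m))))))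
  have h2 : (2 : Nat) ^ 64 * 2 ^ 64 = 2 ^ 128 := by norm_num
  rw [h2, Nat.mod_eq_of_lt hm] at e64
  have hchain : pvBc (pvStep 1 (pvStep 2 (pvStep 4 (pvStep 8 (pvStep 16 (pvStep 32 (pvStep 64 m)))))) % 2 ^ 1) % 2 = pvBc m % 2 := by
    rw [e1]
    rw [show (2:Nat) ^ 2 * 2 ^ 2 = 2 ^ 4 by norm_num] at e2
    rw [show (2:Nat) ^ 4 * 2 ^ 4 = 2 ^ 8 by norm_num] at e4
    rw [show (2:Nat) ^ 8 * 2 ^ 8 = 2 ^ 16 by norm_num] at e8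
    rw [show (2:Nat) ^ 16 * 2 ^ 16 = 2 ^ 32 by norm_num] at e16
    rw [show (2:Nat) ^ 32 * 2 ^ 32 = 2 ^ 64 by norm_num] at e32
    rw [show (2:Nat) ^ 1 * 2 ^ 1 = 2 ^ 2 by norm_num]
    rw [e2, e4, e8, e16, e32, e64]
  set r := pvStep 1 (pvStep 2 (pvStep 4 (pvStep 8 (pvStep 16 (pvStep 32 (pvStep 64 m)))))) with hr
  have hlast : pvBc (r % 2 ^ 1) = r % 2 := by
    have h21 : r % 2 ^ 1 = r % 2 := by norm_num
    rw [h21]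
    have h01 : r % 2 = 0 ∨ r % 2 = 1 := by omega
    rcases h01 with h | h <;> rw [h] <;> decide
  rw [hlast] at hchain
  omega

-- the bound on the formula value inside the domain
theorem pvBound (x y num : Int)
    (hx : -2147483648 ≤ x ∧ x ≤ 2147483648) (hy : -2147483648 ≤ y ∧ y ≤ 2147483648)
    (hn : -2147483648 ≤ num ∧ num ≤ 2147483648) :
    x * x + 3 * x + 2 * x * y + y + y * y + num < 2 ^ 128 := by
  have hpos := mul_nonneg (show (0:Int) ≤ 4294967296 - (x + y) by omega)
    (show (0:Int) ≤ 4294967296 + (x + y) by omega)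
  nlinarith [hpos]

-- the fold on a nonnegative value, pushed down to the Nat level
theorem pvXorFold_natCast (m : Nat) :
    pvXorFold (m : Int)
      = ((pvStep 1 (pvStep 2 (pvStep 4 (pvStep 8 (pvStep 16 (pvStep 32 (pvStep 64 m)))))) : Nat) : Int) := by
  simp only [pvXorFold, pvXorFoldCast]

-- the common core: for any formula value below 2^128, A's counting loop and B's xor fold agree
theorem pvCore (v : Int) (hlt : v < 2 ^ 128) :
    (if PySem.Int.mod (pvBitLoop v 0) 2 = 0 then "." else "#")
      = (if v ≤ 0 then "." else if PySem.Int.band (pvXorFold v) 1 = 1 then "#" else ".") := by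
  by_cases hvp : v ≤ 0
  · rw [if_pos hvp, pvBitLoop, if_neg (not_lt.mpr hvp)]
    decide
  · rw [if_neg hvp]
    set m : Nat := v.toNat with hm
    have hcast : v = (m : Int) := by omega
    have hmlt : m < 2 ^ 128 := by
      have hc : ((2:Int) ^ 128) = ((2 ^ 128 : Nat) : Int) := by push_cast
      omega
    rw [hcast, pvBitLoop_eq m 0, pvXorFold_natCast m]
    set r := pvStep 1 (pvStep 2 (pvStep 4 (pvStep 8 (pvStep 16 (pvStep 32 (pvStep 64 m)))))) with hr
    have hband : PySem.Int.band (r : Int) 1 = ((r % 2 : Nat) : Int) := by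
      have hb := PySem.Int.band_natCast (m := r) (n := 1)
      rw [show ((1:Nat):Int) = (1:Int) by rfl] at hb
      rw [hb, Nat.and_one_is_mod]
    have hmod : PySem.Int.mod ((0:Int) + (pvBc m : Int)) 2 = ((pvBc m % 2 : Nat) : Int) := by
      rw [zero_add, show (2:Int) = ((2:Nat):Int) by rfl, PySem.Int.mod_natCast]
    rw [hband, hmod]
    have hpar : r % 2 = pvBc m % 2 := pvFoldAll m hmlt
    have h01 : pvBc m % 2 = 0 ∨ pvBc m % 2 = 1 := by omega
    rcases h01 with h | h <;> rw [hpar, h] <;> norm_num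

-- ===== VERDICT (by name: the statement is the Claim_ definition above) =====
theorem calc_point_spec : Claim_equal_calc_point := by
  intro x y num hdom
  unfold Dom_calc_point pvDomInt at hdom
  simp only [Bool.and_eq_true, decide_eq_true_eq] at hdom
  unfold Spec_calc_point calc_point calc_point_alt
  exact pvCore _ (pvBound x y num hdom.1.1 hdom.1.2 hdom.2)
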